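-- pv_equiv track=rewrite | github.com/oldJinGyu/Algorithm-with-Python | programmers/완전탐색/피로도.py | solution
-- ===== SOURCE A (Python) =====
-- def solution(k, dungeons):
--     result=[]
--     def dfs(n, k, cnt, b):
--         if b==False or n==len(dungeons):
--             result.append(cnt)
--             return
--
--         for i in range(n, len(dungeons)):
--             if k>=dungeons[i][0]:
--                 k-=dungeons[i][1]
--                 cnt+=1
--                 dfs(n+1,k,cnt,True)
--                 k+=dungeons[i][1]
--                 cnt-=1
--             else:
--                 dfs(n+1,k,cnt,False)
--     dfs(0, k, 0, True)
--     answer = max(result)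
--     return answer
-- ===== SOURCE B (Python) =====
-- def solution(k, dungeons):
--     # Level-synchronous set DP over reachable stamina values instead of exponential DFS.
--     def go(rem, states):
--         if not rem:
--             return 0
--         nxt = {x - f for x in states for (p, f) in rem if x >= p}
--         return (1 + go(rem[1:], nxt)) if nxt else 0
--     return go(dungeons, {k})
-- ===== Notes on version B (the rewrite author's own statement) =====
-- stated objective: faster
-- what changed: Replaced the exponential DFS that enumerates every pick sequence and collects all leaf counts in a list to max over, by a level-synchronous dynamic programming that carries the deduplicated set of reachable stamina values per position and counts how many levels stay reachable.
import Mathlib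
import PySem

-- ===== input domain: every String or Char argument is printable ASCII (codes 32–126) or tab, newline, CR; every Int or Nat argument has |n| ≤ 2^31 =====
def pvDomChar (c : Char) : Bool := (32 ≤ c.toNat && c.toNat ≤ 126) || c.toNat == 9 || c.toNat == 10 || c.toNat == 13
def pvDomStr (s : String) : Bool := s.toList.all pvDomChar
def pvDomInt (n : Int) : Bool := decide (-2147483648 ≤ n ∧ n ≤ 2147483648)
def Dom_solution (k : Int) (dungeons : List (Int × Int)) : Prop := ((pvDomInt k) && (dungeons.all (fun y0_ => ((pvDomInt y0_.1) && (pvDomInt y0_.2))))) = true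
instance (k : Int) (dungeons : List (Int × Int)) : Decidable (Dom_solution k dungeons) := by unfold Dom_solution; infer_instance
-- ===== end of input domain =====

-- B replaces A's exponential DFS over all pick sequences by a level-synchronous DP over the
-- set of reachable stamina values (deduplicated per level); equal return value, different algorithm.

-- ===== PORT A =====
-- dfs(n, k, cnt, b) ported with the suffix rest = dungeons[n:] standing for the position n
-- (the loop 'for i in range(n, len(dungeons))' iterates exactly over rest, and every recursive
-- call goes to position n+1, i.e. rest.tail); the sequential appends to 'result' become the
-- concatenation (flatMap) of the chunks the recursive calls append, in the same order.
def dfsA : List (Int × Int) → Int → Int → Bool → List Int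
  | rest, k, cnt, b =>
    if b = false ∨ rest = [] then [cnt]
    else match rest with
      | [] => [cnt]  -- unreachable (rest ≠ [] here)
      | h :: t =>
        (h :: t).flatMap (fun e =>
          if k ≥ e.1 then dfsA t (k - e.2) (cnt + 1) true
          else dfsA t k cnt false)

-- answer = max(result); result is provably nonempty (dfs always appends), so `.getD 0` never
-- supplies the default — it only unwraps max? on a nonempty list, matching Python's max.
def solution (k : Int) (dungeons : List (Int × Int)) : Int :=
  (PySem.List.max? (dfsA dungeons k 0 true) (fun x => x)).getD 0

-- ===== PORT B =====
-- go(rem, states): the set comprehension {x - f for x in states for (p, f) in rem if x >= p}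
-- becomes Set.ofList of the flatMap/filterMap in the same iteration order.
def goB : List (Int × Int) → List Int → Int
  | [], _ => 0
  | h :: t, states =>
    let nxt : PySem.Set Int :=
      PySem.Set.ofList (states.flatMap (fun x =>
        (h :: t).filterMap (fun e => if x ≥ e.1 then some (x - e.2) else none)))
    if nxt = [] then 0 else 1 + goB t nxt

def solution_alt (k : Int) (dungeons : List (Int × Int)) : Int :=
  goB dungeons (PySem.Set.ofList [k])

-- ===== PRECONDITION & SPEC =====
def Spec_solution (k : Int) (dungeons : List (Int × Int)) (out : Int) : Prop := out = solution_alt k dungeons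
instance (k : Int) (dungeons : List (Int × Int)) (out : Int) : Decidable (Spec_solution k dungeons out) := by unfold Spec_solution; infer_instance

-- ===== CLAIM (what is proved, stated in full; the proofs are below) =====
def Claim_equal_solution : Prop := ∀ (k : Int) (dungeons : List (Int × Int)), Dom_solution k dungeons → Spec_solution k dungeons (solution k dungeons)

-- ===== LEMMAS AND PROOFS =====

-- The common value function: V rem x = the best number of further clears from suffix rem with stamina x.
def V : List (Int × Int) → Int → Int
  | [], _ => 0
  | h :: t, x =>
    ((h :: t).map (fun e => if x ≥ e.1 then 1 + V t (x - e.2) else 0)).foldl max 0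

-- M l = foldl max 0 l (the max of a list of nonnegative ints)
def M (l : List Int) : Int := l.foldl max 0

theorem foldl_max_assoc (l : List Int) : ∀ a b : Int, l.foldl max (max a b) = max a (l.foldl max b) := by
  induction l with
  | nil => intro a b; simp
  | cons c l ih =>
    intro a b
    simp only [List.foldl_cons]
    rw [max_assoc, ih]

theorem init_le_foldl_max (l : List Int) : ∀ a : Int, a ≤ l.foldl max a := by
  induction l with
  | nil => intro a; simp
  | cons c l ih =>
    intro a
    simp only [List.foldl_cons]
    exact le_trans (le_max_left a c) (ih _)

theorem le_foldl_max (l : List Int) : ∀ (a x : Int), x ∈ l → x ≤ l.foldl max a := by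
  induction l with
  | nil => intro a x hx; simp at hx
  | cons c l ih =>
    intro a x hx
    simp only [List.foldl_cons]
    rcases List.mem_cons.mp hx with h | h
    · subst h; exact le_trans (le_max_right a x) (init_le_foldl_max _ _)
    · exact ih _ x h

theorem foldl_max_le (l : List Int) : ∀ (a c : Int), a ≤ c → (∀ x ∈ l, x ≤ c) → l.foldl max a ≤ c := by
  induction l with
  | nil => intro a c ha _; simpa using ha
  | cons b l ih =>
    intro a c ha h
    simp only [List.foldl_cons]
    exact ih _ _ (max_le ha (h b (by simp))) (fun x hx => h x (by simp [hx]))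

theorem foldl_max_mem (l : List Int) : ∀ a : Int, l.foldl max a = a ∨ l.foldl max a ∈ l := by
  induction l with
  | nil => intro a; simp
  | cons b l ih =>
    intro a
    simp only [List.foldl_cons]
    rcases ih (max a b) with h | h
    · rcases max_choice a b with hm | hm
      · left; rw [h, hm]
      · right; rw [h, hm]; simp
    · right; simp [h]

theorem M_nonneg (l : List Int) : 0 ≤ M l := init_le_foldl_max l 0

theorem le_M {l : List Int} {x : Int} (hx : x ∈ l) : x ≤ M l := le_foldl_max l 0 x hx

theorem M_le {l : List Int} {c : Int} (hc : 0 ≤ c) (h : ∀ x ∈ l, x ≤ c) : M l ≤ c :=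
  foldl_max_le l 0 c hc h

theorem M_mem (l : List Int) : M l = 0 ∨ M l ∈ l := foldl_max_mem l 0

theorem M_cons (a : Int) (r : List Int) : M (a :: r) = max a (M r) := by
  show (a :: r).foldl max 0 = max a (r.foldl max 0)
  rw [List.foldl_cons, max_comm 0 a, foldl_max_assoc]

theorem V_nonneg : ∀ (rem : List (Int × Int)) (x : Int), 0 ≤ V rem x := by
  intro rem x
  cases rem with
  | nil => simp [V]
  | cons h t => exact M_nonneg _

theorem mem_ofList {x : Int} {xs : List Int} : x ∈ PySem.Set.ofList xs ↔ x ∈ xs := by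
  rw [← PySem.List.dedup_eq_ofList]
  exact PySem.List.mem_dedup xs x

theorem max?_append_val {l1 l2 : List Int} {a b : Int}
    (h1 : PySem.List.max? l1 (fun x => x) = some a)
    (h2 : PySem.List.max? l2 (fun x => x) = some b) :
    PySem.List.max? (l1 ++ l2) (fun x => x) = some (max a b) := by
  cases l1 with
  | nil => simp [PySem.List.max?] at h1
  | cons x t1 =>
    cases l2 with
    | nil => simp [PySem.List.max?] at h2
    | cons y t2 =>
      rw [PySem.List.max?_id_cons] at h1 h2
      have ha : List.foldl max x t1 = a := by injection h1
      have hb : List.foldl max y t2 = b := by injection h2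
      have : (x :: t1) ++ (y :: t2) = x :: (t1 ++ (y :: t2)) := by simp
      rw [this, PySem.List.max?_id_cons, List.foldl_append, ha]
      simp only [List.foldl_cons]
      rw [foldl_max_assoc, hb]

theorem max?_flatMap_val {α : Type} {l : List α} {F : α → List Int} {g : α → Int} {c : Int}
    (hg : ∀ e, 0 ≤ g e)
    (hF : ∀ e ∈ l, PySem.List.max? (F e) (fun x => x) = some (c + g e)) (hl : l ≠ []) :
    PySem.List.max? (l.flatMap F) (fun x => x) = some (c + M (l.map g)) := by
  induction l with
  | nil => exact absurd rfl hl
  | cons x l ih =>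
    cases l with
    | nil =>
      simp only [List.flatMap_cons, List.flatMap_nil, List.append_nil]
      rw [hF x (by simp)]
      congr 1
      rw [List.map_cons, List.map_nil, M_cons]
      have : M ([] : List Int) = 0 := rfl
      rw [this, max_eq_left (hg x)]
    | cons y l' =>
      have hne : (y :: l') ≠ [] := by simp
      have ih' := ih (fun e he => hF e (List.mem_cons_of_mem _ he)) hne
      have hx := hF x (by simp)
      rw [List.flatMap_cons]
      rw [max?_append_val hx ih']
      congr 1
      conv_rhs => rw [List.map_cons, M_cons]
      rcases le_total (g x) (M (List.map g (y :: l'))) with h | h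
      · rw [max_eq_right h, max_eq_right (by omega)]
      · rw [max_eq_left h, max_eq_left (by omega)]

theorem dfsA_false (rest : List (Int × Int)) (k cnt : Int) :
    dfsA rest k cnt false = [cnt] := by
  cases rest <;> simp [dfsA]

theorem max?_dfsA_false (rest : List (Int × Int)) (k cnt : Int) :
    PySem.List.max? (dfsA rest k cnt false) (fun x => x) = some cnt := by
  rw [dfsA_false, PySem.List.max?_id_cons]
  simp

theorem max?_dfsA_true : ∀ (rest : List (Int × Int)) (k cnt : Int),
    PySem.List.max? (dfsA rest k cnt true) (fun x => x) = some (cnt + V rest k) := by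
  intro rest
  induction rest with
  | nil =>
    intro k cnt
    simp [dfsA, V, PySem.List.max?]
  | cons h t ih =>
    intro k cnt
    have hdfs : dfsA (h :: t) k cnt true =
        (h :: t).flatMap (fun e =>
          if k ≥ e.1 then dfsA t (k - e.2) (cnt + 1) true else dfsA t k cnt false) := by
      simp [dfsA]
    rw [hdfs]
    have := max?_flatMap_val (l := h :: t)
      (F := fun e => if k ≥ e.1 then dfsA t (k - e.2) (cnt + 1) true else dfsA t k cnt false)
      (g := fun e => if k ≥ e.1 then 1 + V t (k - e.2) else 0) (c := cnt)
      (by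
        intro e
        dsimp only
        by_cases hk : k ≥ e.1
        · rw [if_pos hk]
          have := V_nonneg t (k - e.2)
          omega
        · rw [if_neg hk])
      (by
        intro e _
        dsimp only
        by_cases hk : k ≥ e.1
        · rw [if_pos hk, if_pos hk, ih (k - e.2) (cnt + 1)]
          congr 1
          ring
        · rw [if_neg hk, if_neg hk, max?_dfsA_false]
          simp)
      (by simp)
    rw [this]
    rfl

theorem goB_eq : ∀ (rem : List (Int × Int)) (S : List Int), S ≠ [] →
    goB rem S = M (S.map (V rem)) := by
  intro rem
  induction rem with
  | nil =>
    intro S hS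
    simp only [goB]
    symm
    apply le_antisymm
    · apply M_le le_rfl
      intro x hx
      rcases List.mem_map.mp hx with ⟨y, _, hy⟩
      simp [V] at hy
      omega
    · exact M_nonneg _
  | cons h t ih =>
    intro S hS
    simp only [goB]
    set big := S.flatMap (fun x =>
      (h :: t).filterMap (fun e => if x ≥ e.1 then some (x - e.2) else none)) with hbig
    set nxt := PySem.Set.ofList big with hnxt
    have hmem : ∀ y, y ∈ nxt ↔ ∃ x ∈ S, ∃ e ∈ (h :: t), x ≥ e.1 ∧ y = x - e.2 := by
      intro y
      rw [hnxt, mem_ofList, hbig, List.mem_flatMap]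
      constructor
      · rintro ⟨x, hx, hy⟩
        rcases List.mem_filterMap.mp hy with ⟨e, he, hfe⟩
        by_cases hk : x ≥ e.1
        · simp [hk] at hfe
          exact ⟨x, hx, e, he, hk, hfe.symm⟩
        · simp [hk] at hfe
      · rintro ⟨x, hx, e, he, hk, hy⟩
        exact ⟨x, hx, List.mem_filterMap.mpr ⟨e, he, by simp [hk, hy]⟩⟩
    -- the subterm lemma: every feasible pair bounds M (S.map (V (h :: t))) from below
    have hsub : ∀ x ∈ S, ∀ e ∈ (h :: t), x ≥ e.1 →
        1 + V t (x - e.2) ≤ M (S.map (V (h :: t))) := by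
      intro x hx e he hk
      have h1 : (if x ≥ e.1 then 1 + V t (x - e.2) else 0)
          ∈ List.map (fun e => if x ≥ e.1 then 1 + V t (x - e.2) else 0) (h :: t) :=
        List.mem_map.mpr ⟨e, he, rfl⟩
      have h2 : 1 + V t (x - e.2) ≤ V (h :: t) x := by
        have := le_M h1
        simp only [if_pos hk] at this
        simpa [V, M] using this
      have h3 : V (h :: t) x ≤ M (S.map (V (h :: t))) :=
        le_M (List.mem_map.mpr ⟨x, hx, rfl⟩)
      exact le_trans h2 h3
    by_cases hempty : nxt = []
    · simp only [hempty, if_pos]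
      symm
      apply le_antisymm
      · apply M_le le_rfl
        intro v hv
        rcases List.mem_map.mp hv with ⟨x, hx, hvx⟩
        have hall : ∀ e ∈ (h :: t), (if x ≥ e.1 then 1 + V t (x - e.2) else 0) = 0 := by
          intro e he
          by_cases hk : x ≥ e.1
          · exfalso
            have : (x - e.2) ∈ nxt := (hmem _).mpr ⟨x, hx, e, he, hk, rfl⟩
            rw [hempty] at this
            simp at this
          · simp [hk]
        have : V (h :: t) x = 0 := by
          apply le_antisymm
          · apply M_le le_rfl
            intro u hu
            rcases List.mem_map.mp hu with ⟨e, he, heu⟩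
            rw [hall e he] at heu
            omega
          · exact V_nonneg _ _
        omega
      · exact M_nonneg _
    · rw [if_neg hempty]
      rw [ih nxt hempty]
      symm
      apply le_antisymm
      · have hc : 0 ≤ 1 + M (nxt.map (V t)) := by
          have := M_nonneg (nxt.map (V t)); omega
        apply M_le hc
        intro v hv
        rcases List.mem_map.mp hv with ⟨x, hx, hvx⟩
        have : V (h :: t) x ≤ 1 + M (nxt.map (V t)) := by
          apply M_le hc
          intro u hu
          rcases List.mem_map.mp hu with ⟨e, he, heu⟩
          by_cases hk : x ≥ e.1
          · rw [← heu]
            simp only [if_pos hk]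
            have hmemn : (x - e.2) ∈ nxt := (hmem _).mpr ⟨x, hx, e, he, hk, rfl⟩
            have hle : V t (x - e.2) ≤ M (nxt.map (V t)) :=
              le_M (List.mem_map.mpr ⟨x - e.2, hmemn, rfl⟩)
            omega
          · rw [← heu]; simp [hk]; omega
        rw [← hvx]
        simpa [V, M] using this
      · rcases M_mem (nxt.map (V t)) with h0 | hm
        · rw [h0]
          obtain ⟨y, hy⟩ := List.exists_mem_of_ne_nil nxt hempty
          obtain ⟨x, hx, e, he, hk, hyx⟩ := (hmem y).mp hy
          have := hsub x hx e he hk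
          have hv := V_nonneg t (x - e.2)
          omega
        · rcases List.mem_map.mp hm with ⟨y, hy, hyv⟩
          obtain ⟨x, hx, e, he, hk, hyx⟩ := (hmem y).mp hy
          have := hsub x hx e he hk
          rw [← hyv, hyx]
          omega

theorem solution_eq_V (k : Int) (ds : List (Int × Int)) : solution k ds = V ds k := by
  unfold solution
  rw [max?_dfsA_true]
  simp

theorem solution_alt_eq_V (k : Int) (ds : List (Int × Int)) : solution_alt k ds = V ds k := by
  unfold solution_alt
  have h1 : PySem.Set.ofList [k] = [k] := rfl
  rw [h1, goB_eq ds [k] (by simp)]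
  have : M [V ds k] = V ds k := by
    simp [M, max_eq_right (V_nonneg ds k)]
  simpa using this

-- ===== VERDICT (by name: the statement is the Claim_ definition above) =====
theorem solution_spec : Claim_equal_solution := by
  intro k ds _
  unfold Spec_solution
  rw [solution_eq_V, solution_alt_eq_V]
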